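-- pv_equiv track=rewrite | github.com/tzok/rnapolis-py | src/rnapolis/unifier.py | find_atom_inconsistencies
-- ===== SOURCE A (Python) =====
-- from typing import Dict, List, Optional, Set, Tuple
--
-- def find_atom_inconsistencies(atom_names: Dict) -> Dict:
--     """
--     Find inconsistencies in atom names across structures.
--
--     Parameters:
--     -----------
--     atom_names : Dict
--         Dictionary with residue keys as keys and a dictionary of file paths and atom name sets as values
--
--     Returns:
--     --------
--     Dict
--         Dictionary with inconsistent residue keys as keys and a dictionary of file paths and atom name sets as values
--     """
--     inconsistencies = {}
--
--     for key, atoms_by_file in atom_names.items():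
--         # Get all atom sets
--         all_atom_sets = list(atoms_by_file.values())
--
--         # If there are at least two structures to compare
--         if len(all_atom_sets) >= 2:
--             # Check if all atom sets are the same
--             reference_set = all_atom_sets[0]
--             for atom_set in all_atom_sets[1:]:
--                 if atom_set != reference_set:
--                     inconsistencies[key] = atoms_by_file
--                     break
--
--     return inconsistencies
-- ===== SOURCE B (Python) =====
-- def find_atom_inconsistencies(atom_names):
--     return {
--         key: atoms_by_file
--         for key, atoms_by_file in atom_names.items()
--         if len({frozenset(s) for s in atoms_by_file.values()}) > 1
--     }
-- ===== Notes on version B (the rewrite author's own statement) =====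
-- stated objective: simpler
-- what changed: Replaces A's explicit loop with reference-set-plus-early-break pairwise comparison by a single dict comprehension that deduplicates each residue's atom sets into a set of frozensets and keeps the key when more than one distinct set remains (the >=2 guard is subsumed).
import Mathlib
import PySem

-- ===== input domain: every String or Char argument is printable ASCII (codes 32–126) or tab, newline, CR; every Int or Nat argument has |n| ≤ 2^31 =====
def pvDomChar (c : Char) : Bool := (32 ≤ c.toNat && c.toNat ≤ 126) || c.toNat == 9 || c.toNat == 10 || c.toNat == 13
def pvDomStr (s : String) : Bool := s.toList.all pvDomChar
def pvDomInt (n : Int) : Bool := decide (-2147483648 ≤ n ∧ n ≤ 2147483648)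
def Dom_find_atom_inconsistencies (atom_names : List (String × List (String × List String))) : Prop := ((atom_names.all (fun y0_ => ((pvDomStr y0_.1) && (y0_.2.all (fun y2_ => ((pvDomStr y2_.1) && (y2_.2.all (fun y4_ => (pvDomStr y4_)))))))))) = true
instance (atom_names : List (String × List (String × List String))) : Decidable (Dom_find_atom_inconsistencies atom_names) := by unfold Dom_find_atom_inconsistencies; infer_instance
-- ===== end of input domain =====

-- B replaces A's reference-set-plus-early-break pairwise comparison with a dict comprehension that
-- deduplicates each key's atom sets (a set of frozensets) and keeps keys with more than one distinct set;
-- objective: simpler (same cost).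


-- ===== PORT A =====
def find_atom_inconsistencies (atom_names : List (String × List (String × List String))) : List (String × List (String × List String)) :=
  (atom_names.foldl
    (fun (inconsistencies : PySem.Dict String (List (String × List String))) kv =>
      let all_atom_sets := PySem.Dict.values (⟨kv.2⟩ : PySem.Dict String (List String))
      if 2 ≤ all_atom_sets.length then
        let reference_set := PySem.List.pyGetD all_atom_sets 0 []
        -- 'for atom_set in all_atom_sets[1:]: if atom_set != reference_set: …; break' — the body
        -- only inserts once and breaks, so the loop is a first-hit existence test over the slice
        if (PySem.List.slice all_atom_sets (some 1) none).any
             (fun atom_set => !PySem.Set.equal atom_set reference_set) then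
          PySem.Dict.insert inconsistencies kv.1 kv.2
        else inconsistencies
      else inconsistencies)
    PySem.Dict.empty).items

-- ===== PORT B =====
-- {frozenset(s) for s in vals}: a set whose membership test is frozenset equality, i.e. set equality
-- of the element lists (PySem.Set of sets is not in the prelude, so this hand-port is exact by construction)
def pvDistinct (vals : List (List String)) : List (List String) :=
  vals.foldl (fun acc s => if acc.any (fun t => PySem.Set.equal t s) then acc else acc ++ [s]) []

def find_atom_inconsistencies_alt (atom_names : List (String × List (String × List String))) : List (String × List (String × List String)) :=
  ((atom_names.filter
      (fun kv => 1 < (pvDistinct (PySem.Dict.values (⟨kv.2⟩ : PySem.Dict String (List String)))).length)).foldl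
    (fun (d : PySem.Dict String (List (String × List String))) kv => PySem.Dict.insert d kv.1 kv.2)
    PySem.Dict.empty).items

-- ===== PRECONDITION & SPEC =====
def Spec_find_atom_inconsistencies (atom_names : List (String × List (String × List String))) (out : List (String × List (String × List String))) : Prop := out = find_atom_inconsistencies_alt atom_names
instance (atom_names : List (String × List (String × List String))) (out : List (String × List (String × List String))) : Decidable (Spec_find_atom_inconsistencies atom_names out) := by unfold Spec_find_atom_inconsistencies; infer_instance

-- ===== CLAIM (what is proved, stated in full; the proofs are below) =====
def Claim_equal_find_atom_inconsistencies : Prop := ∀ (atom_names : List (String × List (String × List String))), Dom_find_atom_inconsistencies atom_names → Spec_find_atom_inconsistencies atom_names (find_atom_inconsistencies atom_names)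

-- ===== LEMMAS AND PROOFS =====

-- ===== VERDICT (by name: the statement is the Claim_ definition above) =====


-- step function of pvDistinct, for the lemmas below
def pvStep (acc : List (List String)) (s : List String) : List (List String) :=
  if acc.any (fun t => PySem.Set.equal t s) then acc else acc ++ [s]

lemma pvEqual_comm (s t : List String) : PySem.Set.equal s t = PySem.Set.equal t s := by
  by_cases h : PySem.Set.equal s t = true
  · have := (PySem.Set.equal_iff s t).mp h
    exact h.trans (((PySem.Set.equal_iff t s).mpr (fun x => (this x).symm)).symm)
  · by_cases h' : PySem.Set.equal t s = true
    · exact absurd ((PySem.Set.equal_iff s t).mpr (fun x => ((PySem.Set.equal_iff t s).mp h' x).symm)) h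
    · simp [Bool.eq_false_iff.mpr h, Bool.eq_false_iff.mpr h']

lemma pvStep_mono (rest : List (List String)) (acc : List (List String)) :
    acc.length ≤ (rest.foldl pvStep acc).length := by
  induction rest generalizing acc with
  | nil => exact le_rfl
  | cons v rest ih =>
    refine le_trans ?_ (ih (pvStep acc v))
    unfold pvStep; split <;> simp

lemma pvStep_same (rest : List (List String)) (r : List String)
    (h : ∀ s ∈ rest, PySem.Set.equal r s = true) :
    rest.foldl pvStep [r] = [r] := by
  induction rest with
  | nil => rfl
  | cons v rest ih =>
    have hv : PySem.Set.equal r v = true := h v (by simp)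
    have : pvStep [r] v = [r] := by simp [pvStep, hv]
    simpa [this] using ih (fun s hs => h s (by simp [hs]))

lemma pvStep_grow (rest : List (List String)) (r : List String)
    (h : ∃ s ∈ rest, PySem.Set.equal r s = false) :
    2 ≤ (rest.foldl pvStep [r]).length := by
  induction rest with
  | nil => simp at h
  | cons v rest ih =>
    by_cases hv : PySem.Set.equal r v = true
    · have hst : pvStep [r] v = [r] := by simp [pvStep, hv]
      obtain ⟨s, hs, hse⟩ := h
      rcases List.mem_cons.mp hs with hs | hs
      · simp [hs, hv] at hse
      · simpa [hst] using ih ⟨s, hs, hse⟩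
    · have hst : pvStep [r] v = [r, v] := by
        simp [pvStep, Bool.eq_false_iff.mpr hv]
      rw [List.foldl_cons, hst]
      simpa using pvStep_mono rest [r, v]

-- the per-key condition of A equals B's distinct-count test
lemma pvCond_eq (vals : List (List String)) :
    (if 2 ≤ vals.length then
       (PySem.List.slice vals (some 1) none).any
         (fun s => !PySem.Set.equal s (PySem.List.pyGetD vals 0 [])) else false)
    = decide (1 < (pvDistinct vals).length) := by
  cases vals with
  | nil => simp [pvDistinct]
  | cons r rest =>
    have hslice : PySem.List.slice (r :: rest) (some 1) none = rest := by
      simpa using PySem.List.slice_from_one (r :: rest)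
    have hd : pvDistinct (r :: rest) = rest.foldl pvStep [r] := rfl
    rw [hslice, hd]
    by_cases hx : ∃ s ∈ rest, PySem.Set.equal r s = false
    · have h2 := pvStep_grow rest r hx
      obtain ⟨s, hs, hse⟩ := hx
      have hne : rest ≠ [] := by rintro rfl; simp at hs
      have hany : rest.any (fun s => !PySem.Set.equal s (PySem.List.pyGetD (r :: rest) 0 [])) = true := by
        refine List.any_eq_true.mpr ⟨s, hs, ?_⟩
        simp [PySem.List.pyGetD_zero_cons, pvEqual_comm s r, hse]
      have hlen : 2 ≤ (r :: rest).length := by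
        cases rest with
        | nil => exact absurd rfl hne
        | cons _ _ => simp
      rw [if_pos hlen, hany]
      have h1 : 1 < (rest.foldl pvStep [r]).length := by omega
      simp [h1]
    · push_neg at hx
      have hall : ∀ s ∈ rest, PySem.Set.equal r s = true := by
        intro s hs
        have := hx s hs
        cases h : PySem.Set.equal r s with
        | false => exact absurd h this
        | true => rfl
      have hsame := pvStep_same rest r hall
      have hany : rest.any (fun s => !PySem.Set.equal s (PySem.List.pyGetD (r :: rest) 0 [])) = false := by
        simp only [List.any_eq_false]
        intro s hs
        simp [PySem.List.pyGetD_zero_cons, pvEqual_comm s r, hall s hs]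
      rw [hsame]
      have h1 : decide (1 < ([r] : List (List String)).length) = false := by simp
      rw [h1]
      split
      · exact hany
      · rfl


-- ===== VERDICT =====
theorem find_atom_inconsistencies_spec : Claim_equal_find_atom_inconsistencies := by
  intro atom_names _
  unfold Spec_find_atom_inconsistencies find_atom_inconsistencies find_atom_inconsistencies_alt
  rw [List.foldl_filter]
  congr 2
  funext d kv
  have h := pvCond_eq (PySem.Dict.values (⟨kv.2⟩ : PySem.Dict String (List String)))
  simp only [← h]
  split
  · rfl
  · rfl
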